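-- pv_equiv track=rewrite | github.com/rythmscape11/hbc-report-automation | api/index.py | get_currency_for_brands
-- ===== SOURCE A (Python) =====
-- def get_currency_for_brands(brand_list):
--     """Determine currency based on selected brands"""
--     if not brand_list:
--         return "INR", "₹"
--
--     if len(brand_list) == 1:
--         brand = brand_list[0]
--         currency = brand.get("currency", "INR")
--         if currency == "AED":
--             return "AED", "د.إ"
--         elif currency == "USD":
--             return "USD", "$"
--         else:
--             return "INR", "₹"
--
--     # Multiple brands: check if all same currency
--     currencies = set(b.get("currency", "INR") for b in brand_list)
--     if len(currencies) == 1: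
--         curr = list(currencies)[0]
--         if curr == "AED":
--             return "AED", "د.إ"
--         elif curr == "USD":
--             return "USD", "$"
--         else:
--             return "INR", "₹"
--
--     # Mixed currencies
--     return "Mixed", "₹"
-- ===== SOURCE B (Python) =====
-- def get_currency_for_brands(brand_list):
--     """Determine currency based on selected brands"""
--     if not brand_list:
--         return "INR", "₹"
--     curr = brand_list[0].get("currency", "INR")
--     for b in brand_list[1:]:
--         if b.get("currency", "INR") != curr:
--             return "Mixed", "₹"
--     if curr == "AED":
--         return "AED", "د.إ"
--     if curr == "USD":
--         return "USD", "$"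
--     return "INR", "₹"
-- ===== Notes on version B (the rewrite author's own statement) =====
-- stated objective: alternative
-- what changed: B never builds a set: it takes the first brand's currency and does a short-circuit scan of the tail, returning Mixed on the first mismatch, so it uses constant extra memory and can exit early instead of collecting all distinct currencies.
import Mathlib
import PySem

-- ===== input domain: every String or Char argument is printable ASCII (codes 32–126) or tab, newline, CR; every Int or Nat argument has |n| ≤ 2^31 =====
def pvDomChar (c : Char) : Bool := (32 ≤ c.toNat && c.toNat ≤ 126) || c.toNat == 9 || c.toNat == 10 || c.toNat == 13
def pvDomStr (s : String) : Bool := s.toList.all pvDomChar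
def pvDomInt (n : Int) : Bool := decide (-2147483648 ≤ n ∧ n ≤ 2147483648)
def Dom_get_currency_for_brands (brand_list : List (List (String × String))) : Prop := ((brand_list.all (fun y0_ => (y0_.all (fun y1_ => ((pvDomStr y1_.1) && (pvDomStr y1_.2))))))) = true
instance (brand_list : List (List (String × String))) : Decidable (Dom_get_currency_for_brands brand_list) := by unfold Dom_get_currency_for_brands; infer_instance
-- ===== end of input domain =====

-- B replaces A's set-collection with a short-circuit scan against the first brand's currency (objective: alternative).
-- ===== PORT A =====
def get_currency_for_brands (brand_list : List (List (String × String))) : String × String :=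
  if brand_list.isEmpty then ("INR", "₹")
  else if brand_list.length = 1 then
    let brand := brand_list.headI
    let currency := PySem.Dict.getD (PySem.Dict.mk brand) "currency" "INR"
    if currency = "AED" then ("AED", "د.إ")
    else if currency = "USD" then ("USD", "$")
    else ("INR", "₹")
  else
    let currencies : PySem.Set String :=
      PySem.Set.ofList (brand_list.map (fun b => PySem.Dict.getD (PySem.Dict.mk b) "currency" "INR"))
    if currencies.length = 1 then
      let curr := currencies.headI
      if curr = "AED" then ("AED", "د.إ")
      else if curr = "USD" then ("USD", "$")
      else ("INR", "₹")
    else ("Mixed", "₹")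

-- ===== PORT B =====
-- the 'for b in brand_list[1:]' loop with its early 'return "Mixed"'
def gcfbScan (curr : String) : List (List (String × String)) → String × String
  | [] =>
    if curr = "AED" then ("AED", "د.إ")
    else if curr = "USD" then ("USD", "$")
    else ("INR", "₹")
  | b :: rest =>
    if PySem.Dict.getD (PySem.Dict.mk b) "currency" "INR" ≠ curr then ("Mixed", "₹")
    else gcfbScan curr rest

def get_currency_for_brands_alt (brand_list : List (List (String × String))) : String × String :=
  match brand_list with
  | [] => ("INR", "₹")
  | b0 :: rest => gcfbScan (PySem.Dict.getD (PySem.Dict.mk b0) "currency" "INR") rest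

-- ===== PRECONDITION & SPEC =====
def Spec_get_currency_for_brands (brand_list : List (List (String × String))) (out : String × String) : Prop := out = get_currency_for_brands_alt brand_list
instance (brand_list : List (List (String × String))) (out : String × String) : Decidable (Spec_get_currency_for_brands brand_list out) := by unfold Spec_get_currency_for_brands; infer_instance

-- ===== CLAIM =====
def Claim_equal_get_currency_for_brands : Prop := ∀ (brand_list : List (List (String × String))), Dom_get_currency_for_brands brand_list → Spec_get_currency_for_brands brand_list (get_currency_for_brands brand_list)

-- ===== LEMMAS AND PROOFS =====
-- B's scan is: table(curr) if every tail currency equals curr, else Mixed.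
theorem gcfbScan_eq (curr : String) (l : List (List (String × String))) :
    gcfbScan curr l =
      if ∀ b ∈ l, PySem.Dict.getD (PySem.Dict.mk b) "currency" "INR" = curr then
        (if curr = "AED" then ("AED", "د.إ")
         else if curr = "USD" then ("USD", "$")
         else ("INR", "₹"))
      else ("Mixed", "₹") := by
  induction l with
  | nil => simp [gcfbScan]
  | cons b rest ih =>
    simp only [gcfbScan, ih, List.forall_mem_cons]
    by_cases hb : PySem.Dict.getD (PySem.Dict.mk b) "currency" "INR" = curr
    · simp [hb]
    · simp [hb]

-- If every element of a list equals c, set(c :: l) = [c].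
theorem ofList_cons_const (c : String) (l : List String) (h : ∀ x ∈ l, x = c) :
    PySem.Set.ofList (c :: l) = [c] := by
  rw [PySem.Set.ofList_cons]
  have : PySem.Set.discard (PySem.Set.ofList l) c = [] := by
    rw [List.eq_nil_iff_forall_not_mem]
    intro x hx
    rw [PySem.Set.mem_discard] at hx
    exact hx.2 (h x ((PySem.Set.mem_ofList _ _).1 hx.1))
  rw [this]

-- ===== VERDICT =====
theorem get_currency_for_brands_spec : Claim_equal_get_currency_for_brands := by
  intro brand_list _
  unfold Spec_get_currency_for_brands get_currency_for_brands get_currency_for_brands_alt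
  match brand_list with
  | [] => rfl
  | [b] => rfl
  | b1 :: b2 :: rest =>
    simp only [List.isEmpty_cons, Bool.false_eq_true, if_false, List.length_cons]
    have hlen : ¬ rest.length + 1 + 1 = 1 := by omega
    rw [if_neg hlen, gcfbScan_eq]
    set c1 := PySem.Dict.getD (PySem.Dict.mk b1) "currency" "INR" with hc1
    by_cases hall : ∀ b ∈ b2 :: rest, PySem.Dict.getD (PySem.Dict.mk b) "currency" "INR" = c1
    · have hset : PySem.Set.ofList ((b1 :: b2 :: rest).map (fun b => PySem.Dict.getD (PySem.Dict.mk b) "currency" "INR")) = [c1] := by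
        rw [List.map_cons, ← hc1]
        exact ofList_cons_const c1 _ (by
          intro x hx
          rcases List.mem_map.1 hx with ⟨b, hb, hbx⟩
          exact hbx ▸ hall b hb)
      rw [hset, if_pos hall, if_pos (show ([c1] : List String).length = 1 from rfl),
          show ([c1] : List String).headI = c1 from rfl]
    · have hne1 : (PySem.Set.ofList ((b1 :: b2 :: rest).map (fun b => PySem.Dict.getD (PySem.Dict.mk b) "currency" "INR"))).length ≠ 1 := by
        intro h1
        obtain ⟨c, hc⟩ : ∃ c, PySem.Set.ofList ((b1 :: b2 :: rest).map (fun b => PySem.Dict.getD (PySem.Dict.mk b) "currency" "INR")) = [c] := by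
          match hs : PySem.Set.ofList ((b1 :: b2 :: rest).map (fun b => PySem.Dict.getD (PySem.Dict.mk b) "currency" "INR")), h1 with
          | [c], _ => exact ⟨c, rfl⟩
        apply hall
        intro b hb
        have hmemb : PySem.Dict.getD (PySem.Dict.mk b) "currency" "INR" ∈ ([c] : List String) := by
          rw [← hc, PySem.Set.mem_ofList]
          exact List.mem_map.2 ⟨b, List.mem_cons_of_mem _ hb, rfl⟩
        have hmem1 : c1 ∈ ([c] : List String) := by
          rw [← hc, PySem.Set.mem_ofList, hc1]
          exact List.mem_map.2 ⟨b1, List.mem_cons_self, rfl⟩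
        simp at hmemb hmem1
        rw [hmemb, hmem1]
      rw [if_neg hne1, if_neg hall]
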